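-- pv_equiv track=rewrite | github.com/BABS00N/Steganography-apps | Encryptor.py | cyPixel
-- ===== SOURCE A (Python) =====
-- def compare_sum(a, b):
--     if (a + b > 127):
--         c = a - b
--     else:
--         c = a + b
--     return c
--
-- def txt2bit(text, encoding='utf-8', errors='surrogatepass'):
--     bits = bin(int.from_bytes(text.encode(encoding, errors), 'big'))[2:]
--     return bits.zfill(8 * ((len(bits) + 7) // 8))
--
-- def cyPixel(pixel, symbol):
--     pixel_ar = ['', '', '']
--     bit = txt2bit(symbol)
--     bit = list(bit.strip())
--     k=0
--     for i in bit:
--         if k<3: pixel_ar[0]=str(pixel_ar[0])+str(i)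
--         elif k<6: pixel_ar[1]=str(pixel_ar[1])+str(i)
--         else: pixel_ar[2]=str(pixel_ar[2])+str(i)
--         k+=1
--     pixel_ar[0] = compare_sum(pixel[0], int(pixel_ar[0], 2))
--     pixel_ar[1] = compare_sum(pixel[1], int(pixel_ar[1], 2))
--     pixel_ar[2] = compare_sum(pixel[2], int(pixel_ar[2], 2))
--     return [pixel_ar[0], pixel_ar[1], pixel_ar[2]]
-- ===== SOURCE B (Python) =====
-- def compare_sum(a, b):
--     if (a + b > 127):
--         c = a - b
--     else:
--         c = a + b
--     return c
--
-- def txt2bit(text, encoding='utf-8', errors='surrogatepass'):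
--     bits = bin(int.from_bytes(text.encode(encoding, errors), 'big'))[2:]
--     return bits.zfill(8 * ((len(bits) + 7) // 8))
--
-- def cyPixel(pixel, symbol):
--     bit = txt2bit(symbol)
--     return [compare_sum(pixel[0], int(bit[0:3], 2)),
--             compare_sum(pixel[1], int(bit[3:6], 2)),
--             compare_sum(pixel[2], int(bit[6:], 2))]
-- ===== Notes on version B (the rewrite author's own statement) =====
-- stated objective: simpler
-- what changed: Replaces the character-by-character bucket loop with a stateful counter k by direct slicing of the bit string into bit[0:3], bit[3:6], bit[6:], each fed straight to compare_sum in a single returned list expression.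
import Mathlib
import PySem

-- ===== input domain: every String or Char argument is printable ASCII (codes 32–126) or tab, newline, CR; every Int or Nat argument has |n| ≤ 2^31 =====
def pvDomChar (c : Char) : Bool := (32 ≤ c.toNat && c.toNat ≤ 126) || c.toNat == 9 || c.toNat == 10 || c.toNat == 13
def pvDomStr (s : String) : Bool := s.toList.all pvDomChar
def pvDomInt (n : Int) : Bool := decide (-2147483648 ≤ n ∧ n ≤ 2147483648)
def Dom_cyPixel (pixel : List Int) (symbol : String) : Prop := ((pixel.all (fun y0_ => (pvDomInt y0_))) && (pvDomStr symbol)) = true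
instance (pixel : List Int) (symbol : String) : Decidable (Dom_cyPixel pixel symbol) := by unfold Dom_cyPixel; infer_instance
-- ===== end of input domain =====

-- B replaces A's character-by-character bucket loop (counter k) by slicing the bit
-- string into bit[0:3], bit[3:6], bit[6:] directly; objective: simpler.


-- ===== PORT A =====
def compareSum (a b : Int) : Int :=
  if a + b > 127 then a - b else a + b

-- txt2bit: int.from_bytes(text.encode('utf-8'), 'big') is ported as the byte fold over the
-- code points — exact on the ASCII domain (Dom_), where UTF-8 encodes each char as one byte
-- equal to its code point; bin(n)[2:] and zfill are PySem primitives.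
def padBits (bits : List Char) : List Char :=
  PySem.Chars.zfill bits (8 * PySem.Int.floordiv ((bits.length : Int) + 7) 8)

def txt2bit (text : String) : List Char :=
  padBits (PySem.List.slice
    (PySem.Int.toBinChars0b ((text.toList.foldl (fun a c => a * 256 + c.toNat) 0 : Nat) : Int))
    (some 2) none)

-- A's "for i in bit" loop over the three string buckets with counter k
def cyLoop : List Char → List Char × List Char × List Char → Nat → List Char × List Char × List Char
  | [], ar, _ => ar
  | i :: rest, (a0, a1, a2), k =>
    if k < 3 then cyLoop rest (a0 ++ [i], a1, a2) (k + 1)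
    else if k < 6 then cyLoop rest (a0, a1 ++ [i], a2) (k + 1)
    else cyLoop rest (a0, a1, a2 ++ [i]) (k + 1)

-- the three assignments pixel_ar[i] = compare_sum(pixel[i], int(pixel_ar[i], 2)), in order;
-- a none (IndexError on pixel, excluded by Pre_; int(…,2) never fails here) aborts with []
def cyPixel (pixel : List Int) (symbol : String) : List Int :=
  match cyLoop (PySem.Chars.strip (txt2bit symbol)) ([], [], []) 0 with
  | (p0, p1, p2) =>
    match PySem.List.pyGet? pixel 0 with
    | none => []
    | some x0 =>
      match PySem.Int.ofCharsBase? p0 2 with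
      | none => []
      | some v0 =>
        match PySem.List.pyGet? pixel 1 with
        | none => []
        | some x1 =>
          match PySem.Int.ofCharsBase? p1 2 with
          | none => []
          | some v1 =>
            match PySem.List.pyGet? pixel 2 with
            | none => []
            | some x2 =>
              match PySem.Int.ofCharsBase? p2 2 with
              | none => []
              | some v2 => [compareSum x0 v0, compareSum x1 v1, compareSum x2 v2]

-- ===== PORT B =====
-- one list element of B: compare_sum(pixel[i], int(bits, 2)); none = IndexError/ValueError
def cyChan (x? : Option Int) (v? : Option Int) : Option Int :=
  match x? with
  | none => none
  | some x =>
    match v? with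
    | none => none
    | some v => some (compareSum x v)

def cyPixel_alt (pixel : List Int) (symbol : String) : List Int :=
  match cyChan (PySem.List.pyGet? pixel 0)
          (PySem.Int.ofCharsBase? (PySem.List.slice (txt2bit symbol) (some 0) (some 3)) 2) with
  | none => []   -- IndexError (pixel too short): excluded by Pre_
  | some r0 =>
    match cyChan (PySem.List.pyGet? pixel 1)
            (PySem.Int.ofCharsBase? (PySem.List.slice (txt2bit symbol) (some 3) (some 6)) 2) with
    | none => []
    | some r1 =>
      match cyChan (PySem.List.pyGet? pixel 2)
              (PySem.Int.ofCharsBase? (PySem.List.slice (txt2bit symbol) (some 6) none) 2) with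
      | none => []
      | some r2 => [r0, r1, r2]

-- ===== PRECONDITION & SPEC =====
-- Pre_ excludes only pixel lists with fewer than 3 elements, on which Python A raises IndexError.
def Pre_cyPixel (pixel : List Int) (symbol : String) : Prop := 3 ≤ pixel.length
instance (pixel : List Int) (symbol : String) : Decidable (Pre_cyPixel pixel symbol) := by unfold Pre_cyPixel; infer_instance
def pvWitness_cyPixel : List Int × String := ([10, 20, 30], "A")

def Spec_cyPixel (pixel : List Int) (symbol : String) (out : List Int) : Prop := out = cyPixel_alt pixel symbol
instance (pixel : List Int) (symbol : String) (out : List Int) : Decidable (Spec_cyPixel pixel symbol out) := by unfold Spec_cyPixel; infer_instance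

-- ===== CLAIM (what is proved, stated in full; the proofs are below) =====
def Claim_equal_cyPixel : Prop := ∀ (pixel : List Int) (symbol : String), Dom_cyPixel pixel symbol → Pre_cyPixel pixel symbol → Spec_cyPixel pixel symbol (cyPixel pixel symbol)

-- ===== LEMMAS AND PROOFS =====

-- every character Nat.toDigits 2 emits is '0' or '1'
theorem toDigitsCore01 (fuel n : Nat) (acc : List Char)
    (hacc : ∀ c ∈ acc, c = '0' ∨ c = '1') :
    ∀ c ∈ Nat.toDigitsCore 2 fuel n acc, c = '0' ∨ c = '1' := by
  induction fuel generalizing n acc with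
  | zero => simpa [Nat.toDigitsCore] using hacc
  | succ fuel ih =>
    have hd : Nat.digitChar (n % 2) = '0' ∨ Nat.digitChar (n % 2) = '1' := by
      rcases Nat.mod_two_eq_zero_or_one n with h | h <;> simp [h, Nat.digitChar]
    simp only [Nat.toDigitsCore]
    split
    · intro c hc
      rcases List.mem_cons.mp hc with rfl | hc
      · exact hd
      · exact hacc _ hc
    · exact ih _ _ (by
        intro c hc
        rcases List.mem_cons.mp hc with rfl | hc
        · exact hd
        · exact hacc _ hc)

theorem txt2bit01 (s : String) : ∀ c ∈ txt2bit s, c = '0' ∨ c = '1' := by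
  unfold txt2bit padBits
  set n : Nat := s.toList.foldl (fun a c => a * 256 + c.toNat) 0 with hn
  have hnn : ¬ ((n : Int) < 0) := by omega
  have hbits : PySem.List.slice (PySem.Int.toBinChars0b (n : Int)) (some 2) none
      = Nat.toDigits 2 n := by
    simp [PySem.Int.toBinChars0b, hnn, Nat.toDigits]
    rw [show ((2 : Int) = ((2 : Nat) : Int)) by norm_num, PySem.List.slice_from_natCast]
    simp
  rw [hbits]
  set w : Int := 8 * PySem.Int.floordiv (((Nat.toDigits 2 n).length : Int) + 7) 8 with hw
  have hdig : ∀ c ∈ Nat.toDigits 2 n, c = '0' ∨ c = '1' :=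
    toDigitsCore01 _ _ _ (by simp)
  intro c hc
  unfold PySem.Chars.zfill at hc
  split at hc
  · exact hdig _ hc
  · rcases h : Nat.toDigits 2 n with _ | ⟨d, rest⟩
    · simp [h] at hc
      simp [hc]
    · rw [h] at hc
      have hd01 : d = '0' ∨ d = '1' := hdig d (by simp [h])
      have : ¬ (d = '+' ∨ d = '-') := by rcases hd01 with rfl | rfl <;> decide
      simp only [if_neg this] at hc
      rcases List.mem_append.mp hc with hc | hc
      · left; exact List.eq_of_mem_replicate hc
      · exact hdig c (by simp [h, hc])

-- strip is the identity on a string of '0'/'1' characters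
theorem strip01 (l : List Char) (h : ∀ c ∈ l, c = '0' ∨ c = '1') :
    PySem.Chars.strip l = l := by
  have hns : ∀ c ∈ l, PySem.Chars.isspace c = false := by
    intro c hc; rcases h c hc with rfl | rfl <;> decide
  have hls : PySem.Chars.lstrip l = l := by
    unfold PySem.Chars.lstrip
    cases l with
    | nil => rfl
    | cons a t => simp [hns a (by simp)]
  have hrs : PySem.Chars.rstrip l = l := by
    unfold PySem.Chars.rstrip
    cases hrev : l.reverse with
    | nil => simpa using congrArg List.reverse hrev
    | cons a t =>
      have ha : a ∈ l := by
        have : a ∈ l.reverse := by simp [hrev]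
        simpa using this
      rw [List.dropWhile_cons, hns a ha]
      simp [← hrev]
  unfold PySem.Chars.strip
  rw [hls, hrs]

-- A's bucket loop, once the counter has reached 6, appends everything to the third bucket
theorem cyLoop_ge6 (l : List Char) : ∀ (a0 a1 a2 : List Char) (k : Nat), 6 ≤ k →
    cyLoop l (a0, a1, a2) k = (a0, a1, a2 ++ l) := by
  induction l with
  | nil => intro a0 a1 a2 k hk; simp [cyLoop]
  | cons i rest ih =>
    intro a0 a1 a2 k hk
    have h3 : ¬ k < 3 := by omega
    have h6 : ¬ k < 6 := by omega
    simp only [cyLoop, if_neg h3, if_neg h6]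
    rw [ih _ _ _ _ (by omega)]
    simp

-- A's bucket loop from the initial state is exactly the three slices
theorem cyLoop_eq_slices (l : List Char) :
    cyLoop l ([], [], []) 0 = (l.take 3, (l.drop 3).take 3, l.drop 6) := by
  rcases l with _ | ⟨c0, _ | ⟨c1, _ | ⟨c2, _ | ⟨c3, _ | ⟨c4, _ | ⟨c5, rest⟩⟩⟩⟩⟩⟩ <;>
    simp [cyLoop, cyLoop_ge6]

theorem slices_eq (l : List Char) :
    PySem.List.slice l (some 0) (some 3) = l.take 3 ∧
    PySem.List.slice l (some 3) (some 6) = (l.drop 3).take 3 ∧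
    PySem.List.slice l (some 6) none = l.drop 6 := by
  refine ⟨?_, ?_, ?_⟩
  · rw [PySem.List.slice_zero_start, PySem.List.slice_to l (by norm_num)]; norm_num [Int.toNat]
  · rw [PySem.List.slice_toNat l (by norm_num) (by norm_num)]; norm_num [Int.toNat]
  · rw [PySem.List.slice_from l (by norm_num)]; norm_num [Int.toNat]

-- ===== VERDICT (by name: the statement is the Claim_ definition above) =====
theorem cyPixel_spec : Claim_equal_cyPixel := by
  intro pixel symbol _ _
  unfold Spec_cyPixel cyPixel cyPixel_alt
  rw [strip01 _ (txt2bit01 symbol), cyLoop_eq_slices]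
  obtain ⟨h0, h1, h2⟩ := slices_eq (txt2bit symbol)
  rw [h0, h1, h2]
  dsimp only
  rcases PySem.List.pyGet? pixel 0 with _ | x0 <;>
    rcases PySem.List.pyGet? pixel 1 with _ | x1 <;>
      rcases PySem.List.pyGet? pixel 2 with _ | x2 <;>
        rcases PySem.Int.ofCharsBase? ((txt2bit symbol).take 3) 2 with _ | v0 <;>
          rcases PySem.Int.ofCharsBase? (((txt2bit symbol).drop 3).take 3) 2 with _ | v1 <;>
            rcases PySem.Int.ofCharsBase? ((txt2bit symbol).drop 6) 2 with _ | v2 <;>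
              simp [cyChan]
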